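-- pv_equiv track=rewrite | github.com/sam-sonu/chitchat | code/sys_uers/newUserBase.py | compare_employees
-- ===== SOURCE A (Python) =====
-- from typing import List, Dict, Set, Tuple
--
-- def compare_employees(emp_api_data: List[Dict], sys_user_data: List[Dict], log_file: str = None) -> Dict:
--     """
--     Compare employee data between emp_api and sys_users.
--     Returns dictionary with:
--     - new_employees: in emp_api but not in sys_users
--     - common_employees: in both
--     - exited_employees: in sys_users but not in emp_api
--     """
--     # Create sets for comparison using correct fields
--     emp_api_ids = {emp['employeeId'] for emp in emp_api_data}
--     sys_user_emp_nos = {user['emp_no'] for user in sys_user_data}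
--
--     # Find new employees (in emp_api but not in sys_users)
--     new_employee_ids = emp_api_ids - sys_user_emp_nos
--     new_employees = [emp for emp in emp_api_data if emp['employeeId'] in new_employee_ids]
--
--     # Find common employees
--     common_employee_ids = emp_api_ids & sys_user_emp_nos
--     common_employees = [emp for emp in emp_api_data if emp['employeeId'] in common_employee_ids]
--
--     # Find exited employees (in sys_users but not in emp_api)
--     exited_employee_nos = sys_user_emp_nos - emp_api_ids
--     exited_employees = [user for user in sys_user_data if user['emp_no'] in exited_employee_nos]
--
--     return {
--         'new_employees': new_employees,
--         'common_employees': common_employees,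
--         'exited_employees': exited_employees
--     }
-- ===== SOURCE B (Python) =====
-- def compare_employees(emp_api_data, sys_user_data, log_file=None):
--     """Different decomposition: merge both lists into ONE tagged stream, OR
--     per-id bit flags (1 = emp_api, 2 = sys_users) into a single dict in one
--     pass over that stream, then one dispatch pass over the same stream routes
--     each record by its id's final flag value (no sets, no set algebra)."""
--     tagged = [(emp['employeeId'], emp, 1) for emp in emp_api_data] \
--            + [(user['emp_no'], user, 2) for user in sys_user_data]
--     flags = {}
--     for key, _, bit in tagged:
--         flags[key] = flags.get(key, 0) | bit
--     new_employees, common_employees, exited_employees = [], [], []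
--     for key, rec, bit in tagged:
--         f = flags[key]
--         if bit == 1:
--             (common_employees if f == 3 else new_employees).append(rec)
--         elif f == 2:
--             exited_employees.append(rec)
--     return {'new_employees': new_employees,
--             'common_employees': common_employees,
--             'exited_employees': exited_employees}
-- ===== Notes on version B (the rewrite author's own statement) =====
-- stated objective: alternative
-- what changed: Instead of building two id sets and running three set-algebra operations plus three filter comprehensions, B merges both lists into one tagged stream, ORs per-id bit flags (1 = emp_api, 2 = sys_users) into a single dict in one pass over that stream, then a single dispatch pass over the same stream routes each record into its bucket by the id's final flag value.
import Mathlib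
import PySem

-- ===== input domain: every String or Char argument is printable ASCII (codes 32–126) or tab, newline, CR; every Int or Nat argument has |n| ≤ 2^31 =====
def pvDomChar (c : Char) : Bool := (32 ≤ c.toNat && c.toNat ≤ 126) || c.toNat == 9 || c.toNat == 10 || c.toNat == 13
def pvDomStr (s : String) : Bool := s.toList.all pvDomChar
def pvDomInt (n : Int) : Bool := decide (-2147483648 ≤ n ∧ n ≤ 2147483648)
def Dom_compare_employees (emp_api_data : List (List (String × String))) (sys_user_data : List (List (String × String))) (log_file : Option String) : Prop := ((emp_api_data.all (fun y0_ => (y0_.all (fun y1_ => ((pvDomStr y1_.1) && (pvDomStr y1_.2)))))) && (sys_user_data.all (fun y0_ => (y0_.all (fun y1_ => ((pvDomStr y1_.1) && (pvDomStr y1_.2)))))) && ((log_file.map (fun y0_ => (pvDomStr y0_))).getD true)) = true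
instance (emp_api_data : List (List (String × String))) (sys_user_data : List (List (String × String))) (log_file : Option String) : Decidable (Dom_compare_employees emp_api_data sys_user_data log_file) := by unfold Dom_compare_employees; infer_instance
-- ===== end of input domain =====

-- B merges both lists into one tagged stream, ORs per-id bit flags (1 = emp_api,
-- 2 = sys_users) into a single dict in one pass, then one dispatch pass routes
-- each record by its id's final flag value — no sets, no set algebra (objective: alternative).

-- shared helper: Python d[k] as first-match assoc lookup (total form; Pre_ guarantees the key is present)
def pvLookupD (e : List (String × String)) (k : String) : String :=
  (((e.find? (fun p => p.1 == k)).map Prod.snd).getD "")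

-- ===== PORT A =====
def compare_employees (emp_api_data : List (List (String × String))) (sys_user_data : List (List (String × String))) (log_file : Option String) : List (String × List (List (String × String))) :=
  let emp_api_ids : PySem.Set String := PySem.Set.ofList (emp_api_data.map (fun e => pvLookupD e "employeeId"))
  let sys_user_emp_nos : PySem.Set String := PySem.Set.ofList (sys_user_data.map (fun u => pvLookupD u "emp_no"))
  let new_employee_ids := PySem.Set.diff emp_api_ids sys_user_emp_nos
  let new_employees := emp_api_data.filter (fun e => PySem.Set.contains new_employee_ids (pvLookupD e "employeeId"))
  let common_employee_ids := PySem.Set.inter emp_api_ids sys_user_emp_nos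
  let common_employees := emp_api_data.filter (fun e => PySem.Set.contains common_employee_ids (pvLookupD e "employeeId"))
  let exited_employee_nos := PySem.Set.diff sys_user_emp_nos emp_api_ids
  let exited_employees := sys_user_data.filter (fun u => PySem.Set.contains exited_employee_nos (pvLookupD u "emp_no"))
  [("new_employees", new_employees), ("common_employees", common_employees), ("exited_employees", exited_employees)]

-- ===== PORT B =====
-- flags[key] in the dispatch pass cannot miss (flags was built over the very same
-- stream), so Python's flags[key] is ported as getD _ _ 0; Python's '|' is PySem.Int.bor.
def compare_employees_alt (emp_api_data : List (List (String × String))) (sys_user_data : List (List (String × String))) (log_file : Option String) : List (String × List (List (String × String))) :=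
  let tagged : List (String × List (String × String) × Int) :=
    emp_api_data.map (fun e => (pvLookupD e "employeeId", e, (1 : Int)))
    ++ sys_user_data.map (fun u => (pvLookupD u "emp_no", u, (2 : Int)))
  let flags : PySem.Dict String Int :=
    tagged.foldl (fun d t => d.insert t.1 (PySem.Int.bor (d.getD t.1 0) t.2.2)) PySem.Dict.empty
  let r := tagged.foldl
    (fun (acc : List (List (String × String)) × List (List (String × String)) × List (List (String × String))) t =>
      if t.2.2 == 1 then
        if flags.getD t.1 0 == 3 then (acc.1, acc.2.1 ++ [t.2.1], acc.2.2)
        else (acc.1 ++ [t.2.1], acc.2.1, acc.2.2)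
      else if flags.getD t.1 0 == 2 then (acc.1, acc.2.1, acc.2.2 ++ [t.2.1])
      else acc)
    ([], [], [])
  [("new_employees", r.1), ("common_employees", r.2.1), ("exited_employees", r.2.2)]

-- ===== PRECONDITION & SPEC =====
-- Pre_ excludes exactly the inputs where Python A raises KeyError: a record in
-- emp_api_data without an 'employeeId' key, or one in sys_user_data without an 'emp_no' key.
def Pre_compare_employees (emp_api_data : List (List (String × String))) (sys_user_data : List (List (String × String))) (log_file : Option String) : Prop :=
  (∀ e ∈ emp_api_data, (e.find? (fun p => p.1 == "employeeId")).isSome) ∧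
  (∀ u ∈ sys_user_data, (u.find? (fun p => p.1 == "emp_no")).isSome)
instance (emp_api_data : List (List (String × String))) (sys_user_data : List (List (String × String))) (log_file : Option String) : Decidable (Pre_compare_employees emp_api_data sys_user_data log_file) := by unfold Pre_compare_employees; infer_instance

def pvWitness_compare_employees : (List (List (String × String))) × (List (List (String × String))) × Option String :=
  ([[("employeeId", "1"), ("name", "a")]], [[("emp_no", "2")]], none)

def Spec_compare_employees (emp_api_data : List (List (String × String))) (sys_user_data : List (List (String × String))) (log_file : Option String) (out : List (String × List (List (String × String)))) : Prop := out = compare_employees_alt emp_api_data sys_user_data log_file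
instance (emp_api_data : List (List (String × String))) (sys_user_data : List (List (String × String))) (log_file : Option String) (out : List (String × List (List (String × String)))) : Decidable (Spec_compare_employees emp_api_data sys_user_data log_file out) := by unfold Spec_compare_employees; infer_instance

-- ===== CLAIM (what is proved, stated in full; the proofs are below) =====
def Claim_equal_compare_employees : Prop := ∀ (emp_api_data : List (List (String × String))) (sys_user_data : List (List (String × String))) (log_file : Option String), Dom_compare_employees emp_api_data sys_user_data log_file → Pre_compare_employees emp_api_data sys_user_data log_file → Spec_compare_employees emp_api_data sys_user_data log_file (compare_employees emp_api_data sys_user_data log_file)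

-- ===== LEMMAS AND PROOFS =====

-- flag-building pass over the emp part (all tags 1), from a 0/1-valued dict
theorem flag_fold_one (l : List (String × List (String × String) × Int)) (d : PySem.Dict String Int)
    (hl : ∀ t ∈ l, t.2.2 = 1) (hd : ∀ k, d.getD k 0 = 0 ∨ d.getD k 0 = 1) :
    (∀ k, (l.foldl (fun d t => d.insert t.1 (PySem.Int.bor (d.getD t.1 0) t.2.2)) d).getD k 0
        = (if k ∈ l.map (·.1) then 1 else d.getD k 0))
    ∧ (∀ k, (l.foldl (fun d t => d.insert t.1 (PySem.Int.bor (d.getD t.1 0) t.2.2)) d).getD k 0 = 0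
        ∨ (l.foldl (fun d t => d.insert t.1 (PySem.Int.bor (d.getD t.1 0) t.2.2)) d).getD k 0 = 1) := by
  induction l generalizing d with
  | nil => simpa using hd
  | cons h t ih =>
    have ht1 : h.2.2 = 1 := hl h (by simp)
    have hv : PySem.Int.bor (d.getD h.1 0) h.2.2 = 1 := by
      rcases hd h.1 with h0 | h0 <;> rw [ht1, h0] <;> decide
    have hd' : ∀ k, (d.insert h.1 (PySem.Int.bor (d.getD h.1 0) h.2.2)).getD k 0 = 0
        ∨ (d.insert h.1 (PySem.Int.bor (d.getD h.1 0) h.2.2)).getD k 0 = 1 := by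
      intro k
      by_cases hk : k = h.1
      · simp [hk, hv]
      · simpa [PySem.Dict.getD_insert, hk] using hd k
    obtain ⟨ih1, ih2⟩ := ih _ (fun a ha => hl a (List.mem_cons_of_mem _ ha)) hd'
    refine ⟨fun k => ?_, ih2⟩
    rw [List.foldl_cons, ih1 k]
    by_cases hk : k = h.1 <;> by_cases hm : k ∈ t.map (·.1) <;>
      simp [hk, hm, PySem.Dict.getD_insert, hv]

-- |2 is idempotent on the four reachable flag values
theorem bor_two_idem (v : Int) (hv : v = 0 ∨ v = 1 ∨ v = 2 ∨ v = 3) :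
    PySem.Int.bor (PySem.Int.bor v 2) 2 = PySem.Int.bor v 2 := by
  rcases hv with h | h | h | h <;> rw [h] <;> decide

-- flag-building pass over the sys part (all tags 2), from a {0,1,2,3}-valued dict
theorem flag_fold_two (l : List (String × List (String × String) × Int)) (d : PySem.Dict String Int)
    (hl : ∀ t ∈ l, t.2.2 = 2)
    (hd : ∀ k, d.getD k 0 = 0 ∨ d.getD k 0 = 1 ∨ d.getD k 0 = 2 ∨ d.getD k 0 = 3) :
    ∀ k, (l.foldl (fun d t => d.insert t.1 (PySem.Int.bor (d.getD t.1 0) t.2.2)) d).getD k 0 =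
      (if k ∈ l.map (·.1) then PySem.Int.bor (d.getD k 0) 2 else d.getD k 0) := by
  induction l generalizing d with
  | nil => simp
  | cons h t ih =>
    have ht2 : h.2.2 = 2 := hl h (by simp)
    have hd' : ∀ k, (d.insert h.1 (PySem.Int.bor (d.getD h.1 0) h.2.2)).getD k 0 = 0
        ∨ (d.insert h.1 (PySem.Int.bor (d.getD h.1 0) h.2.2)).getD k 0 = 1
        ∨ (d.insert h.1 (PySem.Int.bor (d.getD h.1 0) h.2.2)).getD k 0 = 2
        ∨ (d.insert h.1 (PySem.Int.bor (d.getD h.1 0) h.2.2)).getD k 0 = 3 := by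
      intro k
      by_cases hk : k = h.1
      · rcases hd h.1 with h0 | h0 | h0 | h0 <;>
          simp [hk, ht2, h0] <;> decide
      · simpa [PySem.Dict.getD_insert, hk] using hd k
    have iht := ih _ (fun a ha => hl a (List.mem_cons_of_mem _ ha)) hd'
    intro k
    rw [List.foldl_cons, iht k]
    by_cases hk : k = h.1 <;> by_cases hm : k ∈ t.map (·.1) <;>
      simp [hk, hm, PySem.Dict.getD_insert, ht2, bor_two_idem _ (hd h.1)]

-- dispatch pass over the emp part (all tags 1)
theorem classify_one (q : String × List (String × String) × Int → Bool)
    (flags : PySem.Dict String Int)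
    (l : List (String × List (String × String) × Int)) (hl : ∀ t ∈ l, t.2.2 = 1)
    (hq : ∀ t ∈ l, (flags.getD t.1 0 == 3) = q t)
    (n c x : List (List (String × String))) :
    l.foldl (fun acc t =>
      if t.2.2 == 1 then
        if flags.getD t.1 0 == 3 then (acc.1, acc.2.1 ++ [t.2.1], acc.2.2)
        else (acc.1 ++ [t.2.1], acc.2.1, acc.2.2)
      else if flags.getD t.1 0 == 2 then (acc.1, acc.2.1, acc.2.2 ++ [t.2.1])
      else acc) (n, c, x)
    = (n ++ (l.filter (fun t => !q t)).map (·.2.1), c ++ (l.filter q).map (·.2.1), x) := by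
  induction l generalizing n c x with
  | nil => simp
  | cons h t ih =>
    have ht1 : h.2.2 = 1 := hl h (by simp)
    have hqh : (flags.getD h.1 0 == 3) = q h := hq h (by simp)
    have ih' := ih (fun a ha => hl a (List.mem_cons_of_mem _ ha))
      (fun a ha => hq a (List.mem_cons_of_mem _ ha))
    simp at ih'
    by_cases hc : flags.getD h.1 0 = 3
    · have hq' : q h = true := by rw [← hqh]; simp [hc]
      simp [List.foldl_cons, ht1, hc, hq', ih']
    · have hq' : q h = false := by rw [← hqh]; simp [hc]
      simp [List.foldl_cons, ht1, hc, hq', ih']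

-- dispatch pass over the sys part (all tags 2)
theorem classify_two (r : String × List (String × String) × Int → Bool)
    (flags : PySem.Dict String Int)
    (l : List (String × List (String × String) × Int)) (hl : ∀ t ∈ l, t.2.2 = 2)
    (hr : ∀ t ∈ l, (flags.getD t.1 0 == 2) = r t)
    (n c x : List (List (String × String))) :
    l.foldl (fun acc t =>
      if t.2.2 == 1 then
        if flags.getD t.1 0 == 3 then (acc.1, acc.2.1 ++ [t.2.1], acc.2.2)
        else (acc.1 ++ [t.2.1], acc.2.1, acc.2.2)
      else if flags.getD t.1 0 == 2 then (acc.1, acc.2.1, acc.2.2 ++ [t.2.1])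
      else acc) (n, c, x)
    = (n, c, x ++ (l.filter r).map (·.2.1)) := by
  induction l generalizing n c x with
  | nil => simp
  | cons h t ih =>
    have ht2 : h.2.2 = 2 := hl h (by simp)
    have hrh : (flags.getD h.1 0 == 2) = r h := hr h (by simp)
    have ih' := ih (fun a ha => hl a (List.mem_cons_of_mem _ ha))
      (fun a ha => hr a (List.mem_cons_of_mem _ ha))
    simp at ih'
    by_cases hc : flags.getD h.1 0 = 2
    · have hr' : r h = true := by rw [← hrh]; simp [hc]
      simp [List.foldl_cons, ht2, hc, hr', ih']
    · have hr' : r h = false := by rw [← hrh]; simp [hc]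
      simp [List.foldl_cons, ht2, hc, hr', ih']

theorem contains_diff_of_mem (a s : List String) (x : String) (hx : x ∈ a) :
    PySem.Set.contains (PySem.Set.diff a s) x = !PySem.Set.contains s x := by
  by_cases hs : x ∈ s
  · have : x ∉ PySem.Set.diff a s := fun h => (((PySem.Set.mem_diff _ _ _).mp h).2 hs)
    simp [PySem.Set.contains_eq_listContains, this, hs]
  · have : x ∈ PySem.Set.diff a s := (PySem.Set.mem_diff _ _ _).mpr ⟨hx, hs⟩
    simp [PySem.Set.contains_eq_listContains, this, hs]

theorem contains_inter_of_mem (a s : List String) (x : String) (hx : x ∈ a) :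
    PySem.Set.contains (PySem.Set.inter a s) x = PySem.Set.contains s x := by
  by_cases hs : x ∈ s
  · have : x ∈ PySem.Set.inter a s := (PySem.Set.mem_inter _ _ _).mpr ⟨hx, hs⟩
    simp [PySem.Set.contains_eq_listContains, this, hs]
  · have : x ∉ PySem.Set.inter a s := fun h => hs ((PySem.Set.mem_inter _ _ _).mp h).2
    simp [PySem.Set.contains_eq_listContains, this, hs]

theorem mem_ids_of_mem (l : List (List (String × String))) (k : String)
    (e : List (String × String)) (he : e ∈ l) :
    pvLookupD e k ∈ PySem.Set.ofList (l.map (fun e => pvLookupD e k)) :=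
  (PySem.Set.mem_ofList _ _).mpr (List.mem_map.mpr ⟨e, he, rfl⟩)

-- B evaluated to three filters over the original lists
theorem alt_eval (emp_api_data sys_user_data : List (List (String × String))) (log_file : Option String) :
    compare_employees_alt emp_api_data sys_user_data log_file =
      [("new_employees", emp_api_data.filter (fun e => !decide (pvLookupD e "employeeId" ∈ sys_user_data.map (fun u => pvLookupD u "emp_no")))),
       ("common_employees", emp_api_data.filter (fun e => decide (pvLookupD e "employeeId" ∈ sys_user_data.map (fun u => pvLookupD u "emp_no")))),
       ("exited_employees", sys_user_data.filter (fun u => !decide (pvLookupD u "emp_no" ∈ emp_api_data.map (fun e => pvLookupD e "employeeId"))))] := by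
  have hE : ∀ t ∈ emp_api_data.map (fun e => (pvLookupD e "employeeId", e, (1 : Int))), t.2.2 = (1:Int) := by
    intro t ht; obtain ⟨e, _, rfl⟩ := List.mem_map.mp ht; rfl
  have hS : ∀ t ∈ sys_user_data.map (fun u => (pvLookupD u "emp_no", u, (2 : Int))), t.2.2 = (2:Int) := by
    intro t ht; obtain ⟨u, _, rfl⟩ := List.mem_map.mp ht; rfl
  simp only [compare_employees_alt, List.foldl_append]
  set P1 := emp_api_data.map (fun e => (pvLookupD e "employeeId", e, (1:Int))) with hP1
  set P2 := sys_user_data.map (fun u => (pvLookupD u "emp_no", u, (2:Int))) with hP2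
  set F := List.foldl (fun d t => d.insert t.1 (PySem.Int.bor (d.getD t.1 0) t.2.2))
      (List.foldl (fun d t => d.insert t.1 (PySem.Int.bor (d.getD t.1 0) t.2.2)) PySem.Dict.empty P1) P2 with hF
  obtain ⟨h1, h1v⟩ := flag_fold_one P1 PySem.Dict.empty hE (fun k => Or.inl (by simp))
  have h2 := flag_fold_two P2 _ hS (fun k => (h1v k).elim Or.inl (fun h => Or.inr (Or.inl h)))
  have hids1 : P1.map (·.1) = emp_api_data.map (fun e => pvLookupD e "employeeId") := by
    simp [hP1, List.map_map, Function.comp]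
  have hids2 : P2.map (·.1) = sys_user_data.map (fun u => pvLookupD u "emp_no") := by
    simp [hP2, List.map_map, Function.comp]
  have hb12 : PySem.Int.bor 1 2 = 3 := by decide
  have hb02 : PySem.Int.bor 0 2 = 2 := by decide
  have hq : ∀ t ∈ P1, (F.getD t.1 0 == 3) = decide (t.1 ∈ sys_user_data.map (fun u => pvLookupD u "emp_no")) := by
    intro t ht
    have htE : t.1 ∈ P1.map (·.1) := List.mem_map.mpr ⟨t, ht, rfl⟩
    rw [hF, h2 t.1, h1 t.1]
    by_cases hsm : t.1 ∈ sys_user_data.map (fun u => pvLookupD u "emp_no")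
    · simp [hids2, hsm, htE, hb12]
    · simp [hids2, hsm, htE]
  have hr : ∀ t ∈ P2, (F.getD t.1 0 == 2) = !decide (t.1 ∈ emp_api_data.map (fun e => pvLookupD e "employeeId")) := by
    intro t ht
    have htS : t.1 ∈ P2.map (·.1) := List.mem_map.mpr ⟨t, ht, rfl⟩
    rw [hF, h2 t.1, h1 t.1]
    by_cases hem : t.1 ∈ emp_api_data.map (fun e => pvLookupD e "employeeId")
    · simp [hids1, hem, htS, hb12]
    · simp [hids1, hem, htS, hb02]
  rw [classify_one (fun t => decide (t.1 ∈ sys_user_data.map (fun u => pvLookupD u "emp_no"))) F P1 hE hq [] [] []]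
  rw [classify_two (fun t => !decide (t.1 ∈ emp_api_data.map (fun e => pvLookupD e "employeeId"))) F P2 hS hr _ _ _]
  simp [hP1, hP2, List.filter_map, List.map_map, Function.comp_def]

-- ===== VERDICT (by name: the statement is the Claim_ definition above) =====
theorem compare_employees_spec : Claim_equal_compare_employees := by
  intro emp_api_data sys_user_data log_file _ _
  unfold Spec_compare_employees compare_employees
  rw [alt_eval]
  refine congrArg₂ _ ?_ (congrArg₂ _ ?_ (congrArg₂ _ ?_ rfl))
  · refine congrArg _ (List.filter_congr fun e he => ?_)
    rw [contains_diff_of_mem _ _ _ (mem_ids_of_mem _ _ _ he)]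
    simp [PySem.Set.contains_eq_listContains, PySem.Set.mem_ofList]
  · refine congrArg _ (List.filter_congr fun e he => ?_)
    rw [contains_inter_of_mem _ _ _ (mem_ids_of_mem _ _ _ he)]
    simp [PySem.Set.contains_eq_listContains, PySem.Set.mem_ofList]
  · refine congrArg _ (List.filter_congr fun u hu => ?_)
    rw [contains_diff_of_mem _ _ _ (mem_ids_of_mem _ _ _ hu)]
    simp [PySem.Set.contains_eq_listContains, PySem.Set.mem_ofList]
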